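-- pv_equiv track=rewrite | github.com/feifeilong233/EinsteinChessTestServer | TestServerNet.py | findNearby
-- ===== SOURCE A (Python) =====
-- def findNearby(n, nowPawn):  # 寻找可以移动的棋子
--     ans = []
--     # 如果有对应棋子
--     if nowPawn[n-1] != 0:
--         ans.append(n)
--     #没有对应棋子
--     elif n > 6:
--         for i in range(n-1, 6, -1):
--             if i in nowPawn:
--                 ans.append(i)
--                 break
--         for i in range(n+1, 13):
--             if i in nowPawn:
--                 ans.append(i)
--                 break
--     elif n <= 6:
--         for i in range(n-1, 0, -1):
--             if i in nowPawn:
--                 ans.append(i)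
--                 break
--         for i in range(n+1, 7):
--             if i in nowPawn:
--                 ans.append(i)
--                 break
--     return ans
-- ===== SOURCE B (Python) =====
-- def findNearby(n, nowPawn):  # find movable pawn(s) for dice value n
--     if nowPawn[n-1] != 0:
--         return [n]
--     lo, hi = (7, 12) if n > 6 else (1, 6)
--     down = up = None
--     for v in nowPawn:
--         if lo <= v < n and (down is None or v > down):
--             down = v
--         elif n < v <= hi and (up is None or v < up):
--             up = v
--     ans = []
--     if down is not None:
--         ans.append(down)
--     if up is not None:
--         ans.append(up)
--     return ans
-- ===== Notes on version B (the rewrite author's own statement) =====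
-- stated objective: alternative
-- what changed: Instead of scanning candidate dice-index ranges outward from n with membership tests and break (four directional loops), B makes a single pass over the pawn values themselves, maintaining running best-below and best-above accumulators restricted to n's half-range.
import Mathlib
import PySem

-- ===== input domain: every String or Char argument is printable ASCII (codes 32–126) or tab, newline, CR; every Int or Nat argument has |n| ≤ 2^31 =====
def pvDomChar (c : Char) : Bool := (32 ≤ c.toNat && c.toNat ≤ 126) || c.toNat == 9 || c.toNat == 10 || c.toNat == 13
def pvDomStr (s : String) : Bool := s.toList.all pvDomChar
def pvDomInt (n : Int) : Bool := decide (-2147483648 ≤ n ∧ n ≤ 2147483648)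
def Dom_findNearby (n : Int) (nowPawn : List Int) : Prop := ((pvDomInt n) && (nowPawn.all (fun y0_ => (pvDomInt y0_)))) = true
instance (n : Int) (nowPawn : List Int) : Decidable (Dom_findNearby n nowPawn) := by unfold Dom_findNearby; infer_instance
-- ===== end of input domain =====

-- B replaces A's four directional range scans (membership test + break) by a single pass over
-- the pawn values with running best-below/best-above accumulators; objective: alternative.


-- ===== PORT A =====
-- literal transliteration: ans accumulator, each for-with-break loop is find? over its pyRange
def findNearby (n : Int) (nowPawn : List Int) : List Int :=
  let ans : List Int := []
  match PySem.List.pyGet? nowPawn (n - 1) with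
  | none => ans  -- unreachable under Pre_ (Python raises IndexError here)
  | some v =>
    if v ≠ 0 then
      ans ++ [n]
    else if n > 6 then
      let ans := match (PySem.List.pyRange (n - 1) 6 (-1)).find? (fun i => decide (i ∈ nowPawn)) with
        | some i => ans ++ [i]
        | none => ans
      match (PySem.List.pyRange (n + 1) 13 1).find? (fun i => decide (i ∈ nowPawn)) with
        | some i => ans ++ [i]
        | none => ans
    else if n ≤ 6 then
      let ans := match (PySem.List.pyRange (n - 1) 0 (-1)).find? (fun i => decide (i ∈ nowPawn)) with
        | some i => ans ++ [i]
        | none => ans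
      match (PySem.List.pyRange (n + 1) 7 1).find? (fun i => decide (i ∈ nowPawn)) with
        | some i => ans ++ [i]
        | none => ans
    else ans

-- ===== PORT B =====
-- 'down is None or v > down' update, folded into one helper (exact Python semantics)
def omaxUpd (d : Option Int) (v : Int) : Option Int :=
  match d with
  | none => some v
  | some x => if v > x then some v else some x

-- 'up is None or v < up' update
def ominUpd (u : Option Int) (v : Int) : Option Int :=
  match u with
  | none => some v
  | some x => if v < x then some v else some x

def findNearby_alt (n : Int) (nowPawn : List Int) : List Int :=
  match PySem.List.pyGet? nowPawn (n - 1) with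
  | none => []  -- unreachable under Pre_ (IndexError)
  | some v0 =>
    if v0 ≠ 0 then [n]
    else
      let lh : Int × Int := if n > 6 then (7, 12) else (1, 6)
      let du := nowPawn.foldl (fun (du : Option Int × Option Int) v =>
          if lh.1 ≤ v ∧ v < n then (omaxUpd du.1 v, du.2)
          else if n < v ∧ v ≤ lh.2 then (du.1, ominUpd du.2 v)
          else du) (none, none)
      (match du.1 with | some d => [d] | none => []) ++
      (match du.2 with | some u => [u] | none => [])

-- ===== PRECONDITION & SPEC =====
-- Pre_ excludes exactly the inputs where nowPawn[n-1] raises IndexError in both programs.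
def Pre_findNearby (n : Int) (nowPawn : List Int) : Prop := PySem.Raise.InRange nowPawn.length (n - 1)
instance (n : Int) (nowPawn : List Int) : Decidable (Pre_findNearby n nowPawn) := by unfold Pre_findNearby; infer_instance
def pvWitness_findNearby : Int × List Int := (3, [0, 1, 0, 5])
def Spec_findNearby (n : Int) (nowPawn : List Int) (out : List Int) : Prop := out = findNearby_alt n nowPawn
instance (n : Int) (nowPawn : List Int) (out : List Int) : Decidable (Spec_findNearby n nowPawn out) := by unfold Spec_findNearby; infer_instance

-- ===== CLAIM (what is proved, stated in full; the proofs are below) =====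
def Claim_equal_findNearby : Prop := ∀ (n : Int) (nowPawn : List Int), Dom_findNearby n nowPawn → Pre_findNearby n nowPawn → Spec_findNearby n nowPawn (findNearby n nowPawn)

-- ===== LEMMAS AND PROOFS =====

-- running max over an ascending chain is the last element
theorem foldl_max_eq_getLastD (t : List Int) (x : Int) (h : (x :: t).Pairwise (· ≤ ·)) :
    t.foldl max x = t.getLastD x := by
  induction t generalizing x with
  | nil => rfl
  | cons y t ih =>
    rcases List.pairwise_cons.mp h with ⟨hx, ht⟩
    have hxy : max x y = y := max_eq_right (hx y (by simp))
    simp only [List.foldl_cons, hxy, List.getLastD_cons]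
    exact ih y ht

-- running min from below all elements stays put
theorem foldl_min_eq_self (t : List Int) (x : Int) (h : ∀ y ∈ t, x ≤ y) :
    t.foldl min x = x := by
  induction t with
  | nil => rfl
  | cons y t ih =>
    have hxy : min x y = x := min_eq_left (h y (by simp))
    simp only [List.foldl_cons, hxy]
    exact ih (fun z hz => h z (by simp [hz]))

theorem getLast?_cons_getLastD (x : Int) (t : List Int) : (x :: t).getLast? = some (t.getLastD x) := by
  induction t generalizing x with
  | nil => rfl
  | cons y t ih => rw [List.getLastD_cons, ← ih y]; rfl

-- max? of an ascending (≤) list is its last element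
theorem max?_sorted (l : List Int) (h : l.Pairwise (· ≤ ·)) : l.max? = l.getLast? := by
  cases l with
  | nil => rfl
  | cons x t =>
    rw [List.max?_cons', foldl_max_eq_getLastD t x h, getLast?_cons_getLastD]

-- min? of an ascending (≤) list is its head
theorem min?_sorted (l : List Int) (h : l.Pairwise (· ≤ ·)) : l.min? = l.head? := by
  cases l with
  | nil => rfl
  | cons x t =>
    rw [List.min?_cons', foldl_min_eq_self t x (fun y hy => List.rel_of_pairwise_cons h hy)]
    rfl

theorem pyRange_sorted_le (a b : Int) : (PySem.List.pyRange a b 1).Pairwise (· ≤ ·) :=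
  (PySem.List.pairwise_lt_pyRange_one a b).imp (fun h => le_of_lt h)

-- A's downward scan-and-break = max? of the filtered ascending range
theorem down_eq (lo1 n : Int) (p : Int → Bool) :
    (PySem.List.pyRange (n - 1) (lo1 - 1) (-1)).find? p
      = ((PySem.List.pyRange lo1 n 1).filter p).max? := by
  rw [PySem.List.pyRange_neg_one_eq_reverse]
  have h1 : lo1 - 1 + 1 = lo1 := by ring
  have h2 : n - 1 + 1 = n := by ring
  rw [h1, h2, ← List.head?_filter, List.filter_reverse, List.head?_reverse,
    max?_sorted _ ((pyRange_sorted_le lo1 n).filter p)]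

-- A's upward scan-and-break = min? of the filtered ascending range
theorem up_eq (a b : Int) (p : Int → Bool) :
    (PySem.List.pyRange a b 1).find? p
      = ((PySem.List.pyRange a b 1).filter p).min? := by
  rw [← List.head?_filter, min?_sorted _ ((pyRange_sorted_le a b).filter p)]

-- two lists with the same elements have the same max?
theorem max?_congr_mem (l1 l2 : List Int) (h : ∀ x, x ∈ l1 ↔ x ∈ l2) : l1.max? = l2.max? := by
  cases h1 : l1.max? with
  | none =>
    rw [List.max?_eq_none_iff] at h1
    cases h2 : l2.max? with
    | none => rfl
    | some b =>
      have hb := List.max?_mem h2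
      rw [← h] at hb
      simp [h1] at hb
  | some a =>
    rcases List.max?_eq_some_iff.mp h1 with ⟨ha, hle⟩
    cases h2 : l2.max? with
    | none =>
      rw [List.max?_eq_none_iff] at h2
      rw [h] at ha; simp [h2] at ha
    | some b =>
      rcases List.max?_eq_some_iff.mp h2 with ⟨hb, hle'⟩
      have := hle b ((h b).mpr hb)
      have := hle' a ((h a).mp ha)
      simp only [Option.some.injEq]
      omega

theorem min?_congr_mem (l1 l2 : List Int) (h : ∀ x, x ∈ l1 ↔ x ∈ l2) : l1.min? = l2.min? := by
  cases h1 : l1.min? with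
  | none =>
    rw [List.min?_eq_none_iff] at h1
    cases h2 : l2.min? with
    | none => rfl
    | some b =>
      have hb := List.min?_mem h2
      rw [← h] at hb
      simp [h1] at hb
  | some a =>
    rcases List.min?_eq_some_iff.mp h1 with ⟨ha, hle⟩
    cases h2 : l2.min? with
    | none =>
      rw [List.min?_eq_none_iff] at h2
      rw [h] at ha; simp [h2] at ha
    | some b =>
      rcases List.min?_eq_some_iff.mp h2 with ⟨hb, hle'⟩
      have := hle b ((h b).mpr hb)
      have := hle' a ((h a).mp ha)
      simp only [Option.some.injEq]
      omega

-- extremum of the membership-filtered range = extremum of the window-filtered values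
theorem down_filter_eq (lo1 n : Int) (l : List Int) :
    ((PySem.List.pyRange lo1 n 1).filter (fun i => decide (i ∈ l))).max?
      = (l.filter (fun v => decide (lo1 ≤ v ∧ v < n))).max? := by
  apply max?_congr_mem
  intro x
  simp [List.mem_filter, PySem.List.mem_pyRange_one]
  tauto

theorem up_filter_eq (a b : Int) (l : List Int) :
    ((PySem.List.pyRange a b 1).filter (fun i => decide (i ∈ l))).min?
      = (l.filter (fun v => decide (a ≤ v ∧ v < b))).min? := by
  apply min?_congr_mem
  intro x
  simp [List.mem_filter, PySem.List.mem_pyRange_one]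
  tauto

-- B's interleaved fold splits into two independent folds over the exclusive filters
theorem fold_split (lo hi n : Int) (l : List Int) (d u : Option Int) :
    l.foldl (fun (du : Option Int × Option Int) v =>
        if lo ≤ v ∧ v < n then (omaxUpd du.1 v, du.2)
        else if n < v ∧ v ≤ hi then (du.1, ominUpd du.2 v)
        else du) (d, u)
      = ((l.filter (fun v => decide (lo ≤ v ∧ v < n))).foldl omaxUpd d,
         (l.filter (fun v => decide (n < v ∧ v ≤ hi))).foldl ominUpd u) := by
  induction l generalizing d u with
  | nil => rfl
  | cons v t ih =>
    by_cases h1 : lo ≤ v ∧ v < n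
    · have h2 : ¬ (n < v ∧ v ≤ hi) := by omega
      simp [h1, h2, ih]
    · by_cases h2 : n < v ∧ v ≤ hi
      · simp [h1, h2, ih]
      · simp [h1, h2, ih]

-- the omaxUpd fold from none is List.max?
theorem foldl_omaxUpd_some (l : List Int) (x : Int) : l.foldl omaxUpd (some x) = some (l.foldl max x) := by
  induction l generalizing x with
  | nil => rfl
  | cons v t ih =>
    have hstep : omaxUpd (some x) v = some (max x v) := by
      simp only [omaxUpd]
      by_cases h : v > x
      · rw [if_pos h, max_eq_right (le_of_lt h)]
      · rw [if_neg h, max_eq_left (not_lt.mp h)]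
    simp only [List.foldl_cons, hstep, ih]

theorem foldl_omaxUpd_none (l : List Int) : l.foldl omaxUpd none = l.max? := by
  cases l with
  | nil => rfl
  | cons x t => simp only [List.foldl_cons, omaxUpd, foldl_omaxUpd_some, List.max?_cons']

theorem foldl_ominUpd_some (l : List Int) (x : Int) : l.foldl ominUpd (some x) = some (l.foldl min x) := by
  induction l generalizing x with
  | nil => rfl
  | cons v t ih =>
    have hstep : ominUpd (some x) v = some (min x v) := by
      simp only [ominUpd]
      by_cases h : v < x
      · rw [if_pos h, min_eq_right (le_of_lt h)]
      · rw [if_neg h, min_eq_left (not_lt.mp h)]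
    simp only [List.foldl_cons, hstep, ih]

theorem foldl_ominUpd_none (l : List Int) : l.foldl ominUpd none = l.min? := by
  cases l with
  | nil => rfl
  | cons x t => simp only [List.foldl_cons, ominUpd, foldl_ominUpd_some, List.min?_cons']

-- ===== VERDICT (by name: the statement is the Claim_ definition above) =====
theorem findNearby_spec : Claim_equal_findNearby := by
  intro n nowPawn _ _
  unfold Spec_findNearby findNearby findNearby_alt
  cases hg : PySem.List.pyGet? nowPawn (n - 1) with
  | none => rfl
  | some v =>
    by_cases hv : v ≠ 0
    · simp [hv]
    · simp only [if_neg hv]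
      by_cases h6 : n > 6
      · simp only [if_pos h6]
        rw [fold_split 7 12 n nowPawn none none, foldl_omaxUpd_none, foldl_ominUpd_none]
        have hd := down_eq 7 n (fun i => decide (i ∈ nowPawn))
        norm_num at hd
        have hu := up_eq (n + 1) 13 (fun i => decide (i ∈ nowPawn))
        rw [hd, hu, down_filter_eq 7 n nowPawn, up_filter_eq (n + 1) 13 nowPawn,
          show (fun v => decide ((n : Int) + 1 ≤ v ∧ v < 13)) = (fun v => decide (n < v ∧ v ≤ 12)) from
            funext (fun v => decide_eq_decide.mpr (by omega))]
        cases (nowPawn.filter (fun v => decide (7 ≤ v ∧ v < n))).max? <;>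
          cases (nowPawn.filter (fun v => decide (n < v ∧ v ≤ 12))).min? <;> simp
      · have hle : n ≤ 6 := not_lt.mp h6
        simp only [if_neg h6, if_pos hle]
        rw [fold_split 1 6 n nowPawn none none, foldl_omaxUpd_none, foldl_ominUpd_none]
        have hd := down_eq 1 n (fun i => decide (i ∈ nowPawn))
        norm_num at hd
        have hu := up_eq (n + 1) 7 (fun i => decide (i ∈ nowPawn))
        rw [hd, hu, down_filter_eq 1 n nowPawn, up_filter_eq (n + 1) 7 nowPawn,
          show (fun v => decide ((n : Int) + 1 ≤ v ∧ v < 7)) = (fun v => decide (n < v ∧ v ≤ 6)) from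
            funext (fun v => decide_eq_decide.mpr (by omega))]
        cases (nowPawn.filter (fun v => decide (1 ≤ v ∧ v < n))).max? <;>
          cases (nowPawn.filter (fun v => decide (n < v ∧ v ≤ 6))).min? <;> simp
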